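-- pv_equiv track=rewrite | github.com/wenshijie/Foundations_Of_Algorithms | chapter5/work5.py | queens3
-- ===== SOURCE A (Python) =====
-- def queens3(n):
--     result = [0]*n
--     result1 = [0]*n
--     result2 = [0]*n
--     all_result = []
--
--     def _promising(ii):
--         k = 0
--         switch = True
--         while k < ii:
--             if (abs(result[k]-result[ii])== abs(result1[k]-result1[ii])) |\
--                 (abs(result[k] - result[ii]) == abs(result2[k]-result2[ii])) | \
--                     (abs(result1[k] - result1[ii]) == abs(result2[k] - result2[ii])):
--                 switch = False
--             k += 1
--         return switch
--
--     def _queens(i):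
--         if _promising(i):
--             if i == n-1:
--                 last_result = [(result[i], result1[i], result2[i]) for i in range(n)]
--                 all_result.append(last_result)
--             else:
--                 for j in range(n):
--                     for j1 in range(n):
--                         for j2 in range(n):
--                             result[i+1] = j
--                             result1[i+1] = j1
--                             result2[i+1] = j2
--                             _queens(i+1)
--     _queens(-1)
--     return len(all_result), all_result
-- ===== SOURCE B (Python) =====
-- def _compatible(cfg, x, y, z):
--     for a, b, c in cfg:
--         if abs(a - x) == abs(b - y) or abs(a - x) == abs(c - z) or abs(b - y) == abs(c - z):
--             return False
--     return True
--
--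
-- def queens3(n):
--     if n < 0:
--         return 0, []
--     # breadth-first / level-synchronous search: frontier holds all valid
--     # partial configurations of the current length, in lexicographic order
--     frontier = [[]]
--     for _ in range(n):
--         next_frontier = []
--         for cfg in frontier:
--             for j in range(n):
--                 for j1 in range(n):
--                     for j2 in range(n):
--                         if _compatible(cfg, j, j1, j2):
--                             next_frontier.append(cfg + [(j, j1, j2)])
--         frontier = next_frontier
--     return len(frontier), frontier
-- ===== Notes on version B (the rewrite author's own statement) =====
-- stated objective: alternative
-- what changed: Replaced A's recursive depth-first backtracking over three mutable index arrays (with a while-loop promising check reading the arrays) by an iterative level-synchronous breadth-first search that grows a frontier of immutable partial configurations one board-row at a time, checking each new triple against the configuration at generation time.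
import Mathlib
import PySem

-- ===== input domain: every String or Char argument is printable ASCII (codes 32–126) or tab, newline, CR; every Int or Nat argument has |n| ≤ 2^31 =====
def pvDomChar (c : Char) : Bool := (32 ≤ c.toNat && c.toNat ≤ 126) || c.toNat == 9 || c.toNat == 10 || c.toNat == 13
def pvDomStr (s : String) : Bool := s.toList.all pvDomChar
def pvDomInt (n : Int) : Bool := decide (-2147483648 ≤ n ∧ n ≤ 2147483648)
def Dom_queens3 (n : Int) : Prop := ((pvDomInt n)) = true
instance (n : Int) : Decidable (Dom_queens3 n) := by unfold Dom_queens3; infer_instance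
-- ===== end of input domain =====

-- B replaces A's recursive depth-first backtracking over three mutable parallel arrays by a
-- level-synchronous breadth-first search over immutable partial configurations (objective: alternative).

-- ===== PORT A =====
-- result[k] read: every reachable read is in range, so the `.getD 0` only makes the port total.
def pvGetA (xs : List Int) (i : Int) : Int := (PySem.List.pyGet? xs i).getD 0

-- the `|`-joined condition of _promising's if
def pvCondA (r r1 r2 : List Int) (k ii : Int) : Bool :=
  ((pvGetA r k - pvGetA r ii).natAbs == (pvGetA r1 k - pvGetA r1 ii).natAbs) ||
  ((pvGetA r k - pvGetA r ii).natAbs == (pvGetA r2 k - pvGetA r2 ii).natAbs) ||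
  ((pvGetA r1 k - pvGetA r1 ii).natAbs == (pvGetA r2 k - pvGetA r2 ii).natAbs)

-- the while-loop of _promising
def pvPromA (r r1 r2 : List Int) (ii k : Int) (sw : Bool) : Bool :=
  if k < ii then pvPromA r r1 r2 ii (k + 1) (if pvCondA r r1 r2 k ii then false else sw) else sw
termination_by (ii - k).toNat
decreasing_by omega

-- result[i] = v: every reachable write is in range, so the total pySetD is exact here.
def pvSetA (xs : List Int) (i v : Int) : List Int := PySem.List.pySetD xs i v

-- _queens(i); state = ((result, result1, result2), all_result).  The fuel only makes the
-- recursion total: the call depth from the seed _queens(-1) is at most n+1, so the fuel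
-- n.toNat + 1 supplied below is never exhausted.
def pvQueensRecA (n : Int) :
    Nat → Int → ((List Int × List Int × List Int) × List (List (Int × Int × Int))) →
    ((List Int × List Int × List Int) × List (List (Int × Int × Int)))
  | 0, _, st => st
  | fuel + 1, i, ((r, r1, r2), acc) =>
    if pvPromA r r1 r2 i 0 true then
      if i = n - 1 then
        ((r, r1, r2), acc ++ [(PySem.List.pyRange 0 n 1).map
          (fun t => (pvGetA r t, pvGetA r1 t, pvGetA r2 t))])
      else
        (PySem.List.pyRange 0 n 1).foldl (fun st1 j =>
          (PySem.List.pyRange 0 n 1).foldl (fun st2 j1 =>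
            (PySem.List.pyRange 0 n 1).foldl (fun st3 j2 =>
              pvQueensRecA n fuel (i + 1)
                ((pvSetA st3.1.1 (i + 1) j, pvSetA st3.1.2.1 (i + 1) j1,
                  pvSetA st3.1.2.2 (i + 1) j2), st3.2)) st2) st1) ((r, r1, r2), acc)
    else ((r, r1, r2), acc)

def queens3 (n : Int) : Int × (List (List (Int × Int × Int))) :=
  let r : List Int := List.replicate n.toNat 0
  let st := pvQueensRecA n (n.toNat + 1) (-1) ((r, r, r), [])
  ((st.2.length : Int), st.2)

-- ===== PORT B =====
-- _compatible(cfg, x, y, z)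
def pvCompatB (cfg : List (Int × Int × Int)) (x y z : Int) : Bool :=
  cfg.all (fun p =>
    !(((p.1 - x).natAbs == (p.2.1 - y).natAbs) ||
      ((p.1 - x).natAbs == (p.2.2 - z).natAbs) ||
      ((p.2.1 - y).natAbs == (p.2.2 - z).natAbs)))

-- one level of the breadth-first loop (the nested for-loops filling next_frontier)
def pvStepB (n : Int) (fr : List (List (Int × Int × Int))) : List (List (Int × Int × Int)) :=
  fr.flatMap (fun cfg =>
    (PySem.List.pyRange 0 n 1).flatMap (fun j =>
      (PySem.List.pyRange 0 n 1).flatMap (fun j1 =>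
        (PySem.List.pyRange 0 n 1).flatMap (fun j2 =>
          if pvCompatB cfg j j1 j2 then [cfg ++ [(j, j1, j2)]] else []))))

def queens3_alt (n : Int) : Int × (List (List (Int × Int × Int))) :=
  if n < 0 then (0, [])
  else
    let fr := (PySem.List.pyRange 0 n 1).foldl (fun f _ => pvStepB n f) [[]]
    ((fr.length : Int), fr)

-- ===== PRECONDITION & SPEC =====
def Spec_queens3 (n : Int) (out : Int × (List (List (Int × Int × Int)))) : Prop := out = queens3_alt n
instance (n : Int) (out : Int × (List (List (Int × Int × Int)))) : Decidable (Spec_queens3 n out) := by unfold Spec_queens3; infer_instance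

-- ===== CLAIM (what is proved, stated in full; the proofs are below) =====
def Claim_equal_queens3 : Prop := ∀ (n : Int), Dom_queens3 n → Spec_queens3 n (queens3 n)

-- ===== LEMMAS AND PROOFS =====

-- Abstract middle ground: the pruned search tree below a partial configuration, as both
-- programs enumerate it.  okC cfg = "the last placed triple conflicts with no earlier one".
def okC (cfg : List (Int × Int × Int)) : Bool :=
  match cfg.getLast? with
  | none => true
  | some t => pvCompatB cfg.dropLast t.1 t.2.1 t.2.2

def sols (n : Int) : Nat → List (Int × Int × Int) → List (List (Int × Int × Int))
  | 0, _ => []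
  | fuel + 1, cfg =>
    if okC cfg then
      if (cfg.length : Int) = n then [cfg]
      else (PySem.List.pyRange 0 n 1).flatMap (fun j =>
             (PySem.List.pyRange 0 n 1).flatMap (fun j1 =>
               (PySem.List.pyRange 0 n 1).flatMap (fun j2 =>
                 sols n fuel (cfg ++ [(j, j1, j2)]))))
    else []

-- "the three arrays hold cfg as their prefix"
def MatchesArr (cfg : List (Int × Int × Int)) (r r1 r2 : List Int) : Prop :=
  ∀ (k : Nat) (h : k < cfg.length),
    r[k]? = some (cfg[k].1) ∧ r1[k]? = some (cfg[k].2.1) ∧ r2[k]? = some (cfg[k].2.2)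

lemma okC_concat (ys : List (Int × Int × Int)) (t : Int × Int × Int) :
    okC (ys ++ [t]) = pvCompatB ys t.1 t.2.1 t.2.2 := by
  simp [okC]

lemma promA_eq_all (r r1 r2 : List Int) (ii : Int) : ∀ (m : Nat) (k : Int) (sw : Bool),
    (ii - k).toNat = m →
    pvPromA r r1 r2 ii k sw =
      (sw && (PySem.List.pyRange k ii 1).all (fun k' => !pvCondA r r1 r2 k' ii)) := by
  intro m
  induction m with
  | zero =>
    intro k sw hm
    rw [pvPromA, if_neg (by omega), PySem.List.pyRange_one_eq_nil (by omega)]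
    simp
  | succ m ih =>
    intro k sw hm
    by_cases hk : k < ii
    · rw [pvPromA, if_pos hk, ih (k + 1) _ (by omega), PySem.List.pyRange_one_cons hk]
      cases h : pvCondA r r1 r2 k ii <;> simp [h]
    · rw [pvPromA, if_neg hk, PySem.List.pyRange_one_eq_nil (by omega)]
      simp

lemma promA_eq_okC (cfg : List (Int × Int × Int)) (r r1 r2 : List Int) (i : Int)
    (hlen : (cfg.length : Int) = i + 1) (hm : MatchesArr cfg r r1 r2) :
    pvPromA r r1 r2 i 0 true = okC cfg := by
  rcases List.eq_nil_or_concat cfg with hnil | ⟨ys, t, hcfg⟩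
  · subst hnil
    have hi : i = -1 := by simp at hlen; omega
    rw [promA_eq_all r r1 r2 i ((i - 0).toNat) 0 true rfl,
      PySem.List.pyRange_one_eq_nil (by omega)]
    simp [okC]
  · subst hcfg
    simp only [List.concat_eq_append] at hm hlen ⊢
    have hi : i = (ys.length : Int) := by
      simp only [List.length_append, List.length_cons, List.length_nil] at hlen
      push_cast at hlen; omega
    subst hi
    rw [promA_eq_all _ _ _ _ ((((ys.length : Int)) - 0).toNat) 0 true rfl, okC_concat]
    simp only [Bool.true_and]
    have hcond : ∀ (k : Nat) (hk : k < ys.length),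
        pvCondA r r1 r2 (k : Int) (ys.length : Int) =
        (((ys[k]'hk).1 - t.1).natAbs == ((ys[k]'hk).2.1 - t.2.1).natAbs ||
         (((ys[k]'hk).1 - t.1).natAbs == ((ys[k]'hk).2.2 - t.2.2).natAbs) ||
         (((ys[k]'hk).2.1 - t.2.1).natAbs == ((ys[k]'hk).2.2 - t.2.2).natAbs)) := by
      intro k hk
      have hmk := hm k (by simp [List.length_append]; omega)
      have hml := hm ys.length (by simp [List.length_append])
      have e1 : (ys ++ [t])[k]'(by simp [List.length_append]; omega) = ys[k]'hk := by
        simp [hk]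
      have e2 : (ys ++ [t])[ys.length]'(by simp [List.length_append]) = t := by simp
      rw [e1] at hmk
      rw [e2] at hml
      unfold pvCondA pvGetA
      rw [PySem.List.pyGet?_natCast, PySem.List.pyGet?_natCast, PySem.List.pyGet?_natCast,
        PySem.List.pyGet?_natCast, PySem.List.pyGet?_natCast, PySem.List.pyGet?_natCast,
        hmk.1, hmk.2.1, hmk.2.2, hml.1, hml.2.1, hml.2.2]
      rfl
    have hb : ∀ (b1 b2 : Bool), (b1 = true ↔ b2 = true) → b1 = b2 := by decide
    apply hb
    rw [PySem.List.pyRange_one]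
    simp only [List.all_map, List.all_eq_true, List.mem_range, pvCompatB, Function.comp_apply,
      zero_add, Int.sub_zero, Int.toNat_natCast]
    constructor
    · intro h p hp
      obtain ⟨k, hk, hpk⟩ := List.mem_iff_getElem.mp hp
      have := h k hk
      rw [hcond k hk] at this
      subst hpk
      simpa using this
    · intro h k hk
      have := h (ys[k]'hk) (List.getElem_mem hk)
      rw [hcond k hk]
      simpa using this

lemma leaf_eq (n : Int) (cfg : List (Int × Int × Int)) (r r1 r2 : List Int)
    (hlen : (cfg.length : Int) = n) (hm : MatchesArr cfg r r1 r2) :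
    (PySem.List.pyRange 0 n 1).map (fun t => (pvGetA r t, pvGetA r1 t, pvGetA r2 t)) = cfg := by
  rw [PySem.List.pyRange_one]
  rw [List.map_map]
  apply List.ext_getElem
  · simp; omega
  · intro k h1 h2
    simp only [List.getElem_map, List.getElem_range, Function.comp_apply, zero_add]
    have hmk := hm k h2
    unfold pvGetA
    rw [PySem.List.pyGet?_natCast, PySem.List.pyGet?_natCast, PySem.List.pyGet?_natCast,
      hmk.1, hmk.2.1, hmk.2.2]
    rfl

lemma foldl_acc_aux {α : Type} (g : Int → List (List (Int × Int × Int))) (P : α → Prop) :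
    ∀ (xs : List Int)
      (f : α × List (List (Int × Int × Int)) → Int → α × List (List (Int × Int × Int))),
      (∀ (a : α) (acc : List (List (Int × Int × Int))) (j : Int), j ∈ xs → P a →
        ∃ a', f (a, acc) j = (a', acc ++ g j) ∧ P a') →
      ∀ (a : α) (acc : List (List (Int × Int × Int))), P a →
        ∃ a', xs.foldl f (a, acc) = (a', acc ++ xs.flatMap g) ∧ P a' := by
  intro xs
  induction xs with
  | nil => intro f _ a acc hP; exact ⟨a, by simp, hP⟩
  | cons x xs ih =>
    intro f hstep a acc hP
    obtain ⟨a1, hf, hP1⟩ := hstep a acc x (by simp) hP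
    obtain ⟨a', hfold, hP'⟩ :=
      ih f (fun a acc j hj hPa => hstep a acc j (by simp [hj]) hPa) a1 (acc ++ g x) hP1
    refine ⟨a', ?_, hP'⟩
    rw [List.foldl_cons, hf, hfold]
    simp

lemma matches_weaken (cfg : List (Int × Int × Int)) (w : Int × Int × Int) (r r1 r2 : List Int)
    (h : MatchesArr (cfg ++ [w]) r r1 r2) : MatchesArr cfg r r1 r2 := by
  intro k hk
  have hmk := h k (by simp; omega)
  have e : (cfg ++ [w])[k]'(by simp; omega) = cfg[k]'hk := by simp [hk]
  rwa [e] at hmk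

lemma matches_set (cfg : List (Int × Int × Int)) (w : Int × Int × Int) (r r1 r2 : List Int)
    (hm : MatchesArr cfg r r1 r2)
    (hl : cfg.length < r.length) (hl1 : cfg.length < r1.length) (hl2 : cfg.length < r2.length) :
    MatchesArr (cfg ++ [w]) (r.set cfg.length w.1) (r1.set cfg.length w.2.1)
      (r2.set cfg.length w.2.2) := by
  intro k hk
  simp only [List.length_append, List.length_cons, List.length_nil] at hk
  rcases Nat.lt_or_ge k cfg.length with h | h
  · have hmk := hm k h
    have e : (cfg ++ [w])[k]'(by simp; omega) = cfg[k]'h := by simp [h]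
    rw [e]
    refine ⟨?_, ?_, ?_⟩ <;> rw [List.getElem?_set_ne (by omega)]
    exacts [hmk.1, hmk.2.1, hmk.2.2]
  · have hk' : k = cfg.length := by omega
    subst hk'
    have e : (cfg ++ [w])[cfg.length]'(by simp) = w := by simp
    rw [e]
    exact ⟨List.getElem?_set_self hl, List.getElem?_set_self hl1, List.getElem?_set_self hl2⟩

lemma sols_not_ok (n : Int) (fuel : Nat) (cfg : List (Int × Int × Int))
    (h : okC cfg = false) : sols n (fuel + 1) cfg = [] := by
  rw [sols]; simp [h]

lemma recA_eq_sols (n : Int) : ∀ (fuel : Nat) (i : Int) (r r1 r2 : List Int)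
    (acc : List (List (Int × Int × Int))) (cfg : List (Int × Int × Int)),
    r.length = n.toNat → r1.length = n.toNat → r2.length = n.toNat →
    (cfg.length : Int) = i + 1 → cfg.length ≤ n.toNat →
    MatchesArr cfg r r1 r2 →
    ∃ r' r1' r2', pvQueensRecA n fuel i ((r, r1, r2), acc) = ((r', r1', r2'), acc ++ sols n fuel cfg)
      ∧ r'.length = n.toNat ∧ r1'.length = n.toNat ∧ r2'.length = n.toNat
      ∧ MatchesArr cfg r' r1' r2' := by
  intro fuel
  induction fuel with
  | zero =>
    intro i r r1 r2 acc cfg h1 h2 h3 h4 h5 h6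
    exact ⟨r, r1, r2, by simp [pvQueensRecA, sols], h1, h2, h3, h6⟩
  | succ fuel ih =>
    intro i r r1 r2 acc cfg h1 h2 h3 h4 h5 h6
    have hprom : pvPromA r r1 r2 i 0 true = okC cfg := promA_eq_okC cfg r r1 r2 i h4 h6
    cases hok : okC cfg
    · refine ⟨r, r1, r2, ?_, h1, h2, h3, h6⟩
      rw [pvQueensRecA, hprom, hok, sols_not_ok n fuel cfg hok]
      simp
    · by_cases hi : i = n - 1
      · refine ⟨r, r1, r2, ?_, h1, h2, h3, h6⟩
        have hlen_n : (cfg.length : Int) = n := by omega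
        rw [pvQueensRecA, hprom, hok]
        conv_rhs => rw [sols]
        rw [leaf_eq n cfg r r1 r2 hlen_n h6]
        simp [hok, hlen_n, hi]
      · -- recursive case: the triple loop
        have hmem : ∀ j : Int, j ∈ PySem.List.pyRange 0 n 1 → 0 ≤ j ∧ j < n := by
          intro j hj; exact PySem.List.mem_pyRange_one.mp hj
        have hinner : ∀ (j j1 : Int), j ∈ PySem.List.pyRange 0 n 1 →
            j1 ∈ PySem.List.pyRange 0 n 1 →
            ∀ (a : List Int × List Int × List Int) (acc₀ : List (List (Int × Int × Int)))
              (j2 : Int), j2 ∈ PySem.List.pyRange 0 n 1 →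
            (a.1.length = n.toNat ∧ a.2.1.length = n.toNat ∧ a.2.2.length = n.toNat ∧
              MatchesArr cfg a.1 a.2.1 a.2.2) →
            ∃ a', pvQueensRecA n fuel (i + 1)
                ((pvSetA a.1 (i + 1) j, pvSetA a.2.1 (i + 1) j1, pvSetA a.2.2 (i + 1) j2), acc₀)
                = (a', acc₀ ++ sols n fuel (cfg ++ [(j, j1, j2)]))
              ∧ (a'.1.length = n.toNat ∧ a'.2.1.length = n.toNat ∧ a'.2.2.length = n.toNat ∧
                  MatchesArr cfg a'.1 a'.2.1 a'.2.2) := by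
          intro j j1 hj hj1 a acc₀ j2 hj2 hPa
          obtain ⟨ha1, ha2, ha3, ham⟩ := hPa
          have hjn := hmem j hj
          have hlt : cfg.length < n.toNat := by
            have hne : (cfg.length : Int) ≠ n := by omega
            omega
          have hi1 : (0 : Int) ≤ i + 1 := by omega
          have htn : (i + 1).toNat = cfg.length := by omega
          have hset : ∀ (xs : List Int) (v : Int),
              pvSetA xs (i + 1) v = xs.set cfg.length v := by
            intro xs v; unfold pvSetA; rw [PySem.List.pySetD_of_nonneg xs v hi1, htn]
          obtain ⟨r', r1', r2', heq, l1, l2, l3, hm'⟩ :=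
            ih (i + 1) (a.1.set cfg.length j) (a.2.1.set cfg.length j1)
              (a.2.2.set cfg.length j2) acc₀ (cfg ++ [(j, j1, j2)])
              (by simp [ha1]) (by simp [ha2]) (by simp [ha3])
              (by simp; omega) (by simp; omega)
              (matches_set cfg (j, j1, j2) a.1 a.2.1 a.2.2 ham (by omega) (by omega) (by omega))
          refine ⟨(r', r1', r2'), ?_, l1, l2, l3, matches_weaken _ _ _ _ _ hm'⟩
          rw [hset, hset, hset, heq]
        obtain ⟨a', hfold, hP'⟩ :=
          foldl_acc_aux
            (g := fun j => (PySem.List.pyRange 0 n 1).flatMap (fun j1 =>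
              (PySem.List.pyRange 0 n 1).flatMap (fun j2 =>
                sols n fuel (cfg ++ [(j, j1, j2)]))))
            (P := fun a => a.1.length = n.toNat ∧ a.2.1.length = n.toNat ∧
              a.2.2.length = n.toNat ∧ MatchesArr cfg a.1 a.2.1 a.2.2)
            (PySem.List.pyRange 0 n 1)
            (fun st1 j => (PySem.List.pyRange 0 n 1).foldl (fun st2 j1 =>
              (PySem.List.pyRange 0 n 1).foldl (fun st3 j2 =>
                pvQueensRecA n fuel (i + 1)
                  ((pvSetA st3.1.1 (i + 1) j, pvSetA st3.1.2.1 (i + 1) j1,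
                    pvSetA st3.1.2.2 (i + 1) j2), st3.2)) st2) st1)
            (by
              intro a acc₀ j hj hPa
              exact foldl_acc_aux
                (g := fun j1 => (PySem.List.pyRange 0 n 1).flatMap (fun j2 =>
                  sols n fuel (cfg ++ [(j, j1, j2)])))
                (P := fun a => a.1.length = n.toNat ∧ a.2.1.length = n.toNat ∧
                  a.2.2.length = n.toNat ∧ MatchesArr cfg a.1 a.2.1 a.2.2)
                (PySem.List.pyRange 0 n 1)
                (fun st2 j1 => (PySem.List.pyRange 0 n 1).foldl (fun st3 j2 =>
                  pvQueensRecA n fuel (i + 1)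
                    ((pvSetA st3.1.1 (i + 1) j, pvSetA st3.1.2.1 (i + 1) j1,
                      pvSetA st3.1.2.2 (i + 1) j2), st3.2)) st2)
                (by
                  intro a acc₁ j1 hj1 hPa1
                  exact foldl_acc_aux
                    (g := fun j2 => sols n fuel (cfg ++ [(j, j1, j2)]))
                    (P := fun a => a.1.length = n.toNat ∧ a.2.1.length = n.toNat ∧
                      a.2.2.length = n.toNat ∧ MatchesArr cfg a.1 a.2.1 a.2.2)
                    (PySem.List.pyRange 0 n 1)
                    (fun st3 j2 => pvQueensRecA n fuel (i + 1)
                      ((pvSetA st3.1.1 (i + 1) j, pvSetA st3.1.2.1 (i + 1) j1,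
                        pvSetA st3.1.2.2 (i + 1) j2), st3.2))
                    (fun a acc₂ j2 hj2 hPa2 => hinner j j1 hj hj1 a acc₂ j2 hj2 hPa2)
                    a acc₁ hPa1)
                a acc₀ hPa)
            (r, r1, r2) acc ⟨h1, h2, h3, h6⟩
        refine ⟨a'.1, a'.2.1, a'.2.2, ?_, hP'.1, hP'.2.1, hP'.2.2.1, hP'.2.2.2⟩
        rw [pvQueensRecA, hprom, hok]
        simp only [if_true]
        rw [if_neg hi, hfold]
        conv_rhs => rw [sols]
        have hne : ¬((cfg.length : Int) = n) := by omega
        simp [hok, hne]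

def iterB (n : Int) : Nat → List (List (Int × Int × Int)) → List (List (Int × Int × Int))
  | 0, fr => fr
  | k + 1, fr => iterB n k (pvStepB n fr)

lemma foldl_step_eq_iterB (n : Int) (xs : List Int) (fr : List (List (Int × Int × Int))) :
    xs.foldl (fun f _ => pvStepB n f) fr = iterB n xs.length fr := by
  induction xs generalizing fr with
  | nil => rfl
  | cons x xs ih => simp only [List.foldl_cons, List.length_cons, iterB]; exact ih _

lemma iterB_eq_sols (n : Int) : ∀ (k : Nat) (F : List (List (Int × Int × Int))),
    (k : Int) ≤ n →
    (∀ cfg ∈ F, okC cfg = true ∧ (cfg.length : Int) = n - k) →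
    iterB n k F = F.flatMap (sols n (k + 1)) := by
  intro k
  induction k with
  | zero =>
    intro F _ hF
    simp only [iterB, Nat.zero_add]
    have h : F.flatMap (sols n 1) = F.flatMap (fun cfg => [cfg]) := by
      apply List.flatMap_congr
      intro cfg hc
      have hc2 : (cfg.length : Int) = n := by have := (hF cfg hc).2; omega
      rw [sols]
      simp [(hF cfg hc).1, hc2]
    rw [h, List.flatMap_singleton']
  | succ k ih =>
    intro F hk hF
    simp only [iterB]
    have hmem : ∀ cfg' ∈ pvStepB n F, okC cfg' = true ∧ (cfg'.length : Int) = n - k := by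
      intro cfg' hc'
      simp only [pvStepB, List.mem_flatMap] at hc'
      obtain ⟨cfg, hcfg, j, hj, j1, hj1, j2, hj2, hin⟩ := hc'
      by_cases hcomp : pvCompatB cfg j j1 j2
      · rw [if_pos hcomp] at hin
        simp only [List.mem_singleton] at hin
        subst hin
        refine ⟨by rw [okC_concat]; exact hcomp, ?_⟩
        have := (hF cfg hcfg).2
        simp only [List.length_append, List.length_cons, List.length_nil]
        push_cast
        omega
      · rw [if_neg hcomp] at hin
        simp at hin
    rw [ih (pvStepB n F) (by omega) hmem]
    simp only [pvStepB, List.flatMap_assoc]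
    apply List.flatMap_congr
    intro cfg hc
    conv_rhs => rw [sols]
    have hok := (hF cfg hc).1
    have hne : ¬((cfg.length : Int) = n) := by have := (hF cfg hc).2; omega
    simp only [hok, hne, if_true, if_false]
    apply List.flatMap_congr; intro j _
    apply List.flatMap_congr; intro j1 _
    apply List.flatMap_congr; intro j2 _
    by_cases hcomp : pvCompatB cfg j j1 j2
    · rw [if_pos hcomp]
      simp
    · rw [if_neg hcomp]
      have hko : okC (cfg ++ [(j, j1, j2)]) = false := by
        rw [okC_concat]; simpa using hcomp
      rw [sols_not_ok n k _ hko]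
      simp

lemma queens3_eq (n : Int) : queens3 n = queens3_alt n := by
  obtain ⟨r', r1', r2', heq, -, -, -, -⟩ :=
    recA_eq_sols n (n.toNat + 1) (-1) (List.replicate n.toNat 0) (List.replicate n.toNat 0)
      (List.replicate n.toNat 0) [] []
      (by simp) (by simp) (by simp) (by simp) (by simp)
      (fun k hk => absurd hk (by simp))
  simp only [queens3]
  rw [heq]
  by_cases hn : n < 0
  · have hfuel : n.toNat + 1 = 1 := by omega
    rw [hfuel, sols]
    unfold queens3_alt
    rw [if_pos hn]
    simp [okC, PySem.List.pyRange_one_eq_nil (le_of_lt hn), show ¬((0 : Int) = n) by omega]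
  · unfold queens3_alt
    rw [if_neg hn]
    rw [foldl_step_eq_iterB, PySem.List.length_pyRange_one]
    have ht : ((n : Int) - 0).toNat = n.toNat := by omega
    rw [ht]
    rw [iterB_eq_sols n n.toNat [[]] (by omega)
      (by intro cfg hc; simp only [List.mem_singleton] at hc; subst hc
          exact ⟨rfl, by simp; omega⟩)]
    simp

-- ===== VERDICT (by name: the statement is the Claim_ definition above) =====
theorem queens3_spec : Claim_equal_queens3 := by
  intro n _
  show queens3 n = queens3_alt n
  exact queens3_eq n
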